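-- pv_equiv track=rewrite | github.com/differentialdistinguisher/Enhanced-related-key-differential-neural-distinguishers | Basic/Simon3264/simon32_rkdiff.py | expand_key_simon_all
-- ===== SOURCE A (Python) =====
-- def WORD_SIZE():
--     return(16)
--
-- MASK_VAL = 2 ** WORD_SIZE() - 1
--
-- const = [0xfffd, 0xfffd, 0xfffd, 0xfffd,
--          0xfffd, 0xfffc, 0xfffd, 0xfffc,
--          0xfffc, 0xfffc, 0xfffd, 0xfffc,
--          0xfffc, 0xfffd, 0xfffc, 0xfffd,
--          0xfffc, 0xfffd, 0xfffd, 0xfffc,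
--          0xfffc, 0xfffc, 0xfffc, 0xfffd,
--          0xfffd, 0xfffd, 0xfffc, 0xfffc]
--
-- def ror(x,k):
--     return((x >> k) | ((x << (WORD_SIZE() - k)) & MASK_VAL))
--
-- def expand_key_simon_all(k, t):
--     keys = [k]
--     if t < 4:
--         res = []
--         for i in range(t):
--             res.append(k[3-i])
--         return res
--     ks = [0 for i in range(t)]
--     ks[0] = k[3]
--     ks[1] = k[2]
--     ks[2] = k[1]
--     ks[3] = k[0]
--     for i in range(t - 4):
--         tmp = ror(ks[i+3],3) ^ ks[i+1]
--         ks[i+4] = const[i] ^ ks[i] ^ tmp ^ ror(tmp,1)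
--     return(ks)
-- ===== SOURCE B (Python) =====
-- def WORD_SIZE():
--     return(16)
--
-- MASK_VAL = 2 ** WORD_SIZE() - 1
--
-- const = [0xfffd, 0xfffd, 0xfffd, 0xfffd,
--          0xfffd, 0xfffc, 0xfffd, 0xfffc,
--          0xfffc, 0xfffc, 0xfffd, 0xfffc,
--          0xfffc, 0xfffd, 0xfffc, 0xfffd,
--          0xfffc, 0xfffd, 0xfffd, 0xfffc,
--          0xfffc, 0xfffc, 0xfffc, 0xfffd,
--          0xfffd, 0xfffd, 0xfffc, 0xfffc]
--
-- def ror(x, k):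
--     return ((x >> k) | ((x << (WORD_SIZE() - k)) & MASK_VAL))
--
-- def _sched(w0, w1, w2, w3, i, n):
--     # next n schedule words, given only the current 4-word window ks[i..i+3];
--     # no schedule array is ever stored
--     if n <= 4:
--         return [w0, w1, w2, w3][:n]
--     tmp = ror(w3, 3) ^ w1
--     return [w0] + _sched(w1, w2, w3, const[i] ^ w0 ^ tmp ^ ror(tmp, 1), i + 1, n - 1)
--
-- def expand_key_simon_all(k, t):
--     if t <= 0:
--         return []
--     return _sched(k[3], k[2], k[1], k[0], 0, t)
-- ===== Notes on version B (the rewrite author's own statement) =====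
-- stated objective: alternative
-- what changed: A preallocates a t-word schedule array, seeds it by index assignment and fills it with indexed reads/writes; B never stores the schedule: it recurses carrying only the 4-word sliding window as four scalar arguments, emitting one word per call and handling t<4 by slicing the window, so the array and its index arithmetic disappear.
import Mathlib
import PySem

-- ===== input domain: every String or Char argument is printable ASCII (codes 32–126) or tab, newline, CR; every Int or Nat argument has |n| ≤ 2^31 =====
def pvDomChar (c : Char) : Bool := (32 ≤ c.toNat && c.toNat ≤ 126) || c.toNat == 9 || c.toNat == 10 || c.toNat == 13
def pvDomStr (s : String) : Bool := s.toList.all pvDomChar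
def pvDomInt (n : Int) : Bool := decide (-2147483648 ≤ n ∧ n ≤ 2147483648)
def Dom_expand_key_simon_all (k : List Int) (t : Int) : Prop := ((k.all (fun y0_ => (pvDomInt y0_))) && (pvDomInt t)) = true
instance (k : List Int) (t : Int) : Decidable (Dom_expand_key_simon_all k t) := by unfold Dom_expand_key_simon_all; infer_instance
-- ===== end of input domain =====

-- B replaces A's preallocated schedule array and separate t<4 branch by a recursion carrying
-- only the 4-word sliding window as scalars, never storing the schedule (objective: alternative);
-- equivalence proved on Pre_ (inputs where the Python A returns).


-- ===== PORT A =====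
-- module constant `const`
def pvConst : List Int := [0xfffd, 0xfffd, 0xfffd, 0xfffd,
  0xfffd, 0xfffc, 0xfffd, 0xfffc,
  0xfffc, 0xfffc, 0xfffd, 0xfffc,
  0xfffc, 0xfffd, 0xfffc, 0xfffd,
  0xfffc, 0xfffd, 0xfffd, 0xfffc,
  0xfffc, 0xfffc, 0xfffc, 0xfffd,
  0xfffd, 0xfffd, 0xfffc, 0xfffc]

-- ror(x,k) = (x >> k) | ((x << (16 - k)) & 0xffff); exact (Lean's >>> / <<< on Int are Python's shifts)
def pvRor (x : Int) (s : Nat) : Int :=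
  PySem.Int.bor (x >>> s) (PySem.Int.band (x <<< (16 - s)) 65535)

-- body of A's for-loop over i in range(t-4); ks[i+4] = ... is a List.set at an in-range index (Pre_)
def pvStepA (ks : List Int) (i : Int) : List Int :=
  let tmp := PySem.Int.bxor (pvRor (PySem.List.pyGetD ks (i+3) 0) 3) (PySem.List.pyGetD ks (i+1) 0)
  ks.set (i+4).toNat (PySem.Int.bxor (PySem.Int.bxor (PySem.Int.bxor (PySem.List.pyGetD pvConst i 0) (PySem.List.pyGetD ks i 0)) tmp) (pvRor tmp 1))

def expand_key_simon_all (k : List Int) (t : Int) : List Int :=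
  if t < 4 then
    (PySem.List.pyRange 0 t 1).foldl (fun res i => res ++ [PySem.List.pyGetD k (3 - i) 0]) []
  else
    let ks := List.replicate t.toNat 0
    let ks := ks.set 0 (PySem.List.pyGetD k 3 0)
    let ks := ks.set 1 (PySem.List.pyGetD k 2 0)
    let ks := ks.set 2 (PySem.List.pyGetD k 1 0)
    let ks := ks.set 3 (PySem.List.pyGetD k 0 0)
    (PySem.List.pyRange 0 (t-4) 1).foldl pvStepA ks

-- ===== PORT B =====
-- B's helper _sched: the next n schedule words given only the 4-word window ks[i..i+3]
def pvSched (w0 w1 w2 w3 : Int) (i : Int) (n : Int) : List Int :=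
  if n ≤ 4 then PySem.List.slice [w0, w1, w2, w3] none (some n)
  else
    let tmp := PySem.Int.bxor (pvRor w3 3) w1
    w0 :: pvSched w1 w2 w3 (PySem.Int.bxor (PySem.Int.bxor (PySem.Int.bxor (PySem.List.pyGetD pvConst i 0) w0) tmp) (pvRor tmp 1)) (i+1) (n-1)
  termination_by n.toNat
  decreasing_by omega

def expand_key_simon_all_alt (k : List Int) (t : Int) : List Int :=
  if t ≤ 0 then []
  else pvSched (PySem.List.pyGetD k 3 0) (PySem.List.pyGetD k 2 0) (PySem.List.pyGetD k 1 0) (PySem.List.pyGetD k 0 0) 0 t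

-- ===== PRECONDITION & SPEC =====
-- Pre_ = exactly where the Python A returns: 0 < t needs k[3] (IndexError on len(k) < 4) and,
-- for t > 32, const[i] raises IndexError at i = 28.
def Pre_expand_key_simon_all (k : List Int) (t : Int) : Prop :=
  t ≤ 0 ∨ (4 ≤ k.length ∧ t ≤ 32)
instance (k : List Int) (t : Int) : Decidable (Pre_expand_key_simon_all k t) := by
  unfold Pre_expand_key_simon_all; infer_instance

def pvWitness_expand_key_simon_all : List Int × Int := ([1, 2, 3, 4], 10)

def Spec_expand_key_simon_all (k : List Int) (t : Int) (out : List Int) : Prop := out = expand_key_simon_all_alt k t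
instance (k : List Int) (t : Int) (out : List Int) : Decidable (Spec_expand_key_simon_all k t out) := by unfold Spec_expand_key_simon_all; infer_instance

-- ===== CLAIM (what is proved, stated in full; the proofs are below) =====
def Claim_equal_expand_key_simon_all : Prop := ∀ (k : List Int) (t : Int), Dom_expand_key_simon_all k t → Pre_expand_key_simon_all k t → Spec_expand_key_simon_all k t (expand_key_simon_all k t)

-- ===== LEMMAS AND PROOFS =====

-- one step of A's loop, on pre ++ window ++ zero padding, with pre.length = i
lemma pvStepA_eq (m : Nat) (pre : List Int) (w0 w1 w2 w3 : Int) (i : Int)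
    (hi : 0 ≤ i) (hl : pre.length = i.toNat) :
    pvStepA (pre ++ [w0, w1, w2, w3] ++ List.replicate (m+1) 0) i
      = (pre ++ [w0]) ++ [w1, w2, w3,
          PySem.Int.bxor (PySem.Int.bxor (PySem.Int.bxor (PySem.List.pyGetD pvConst i 0) w0)
            (PySem.Int.bxor (pvRor w3 3) w1))
            (pvRor (PySem.Int.bxor (pvRor w3 3) w1) 1)] ++ List.replicate m 0 := by
  have e3 : PySem.List.pyGetD (pre ++ [w0, w1, w2, w3] ++ List.replicate (m+1) 0) (i+3) 0 = w3 := by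
    rw [PySem.List.pyGetD_eq_getElem _ _ (by omega) (by simp; omega)]
    simp only [show (i+3).toNat = pre.length + 3 from by omega]
    rw [List.getElem_append_left (by simp), List.getElem_append_right (by omega)]
    simp
  have e1 : PySem.List.pyGetD (pre ++ [w0, w1, w2, w3] ++ List.replicate (m+1) 0) (i+1) 0 = w1 := by
    rw [PySem.List.pyGetD_eq_getElem _ _ (by omega) (by simp; omega)]
    simp only [show (i+1).toNat = pre.length + 1 from by omega]
    rw [List.getElem_append_left (by simp), List.getElem_append_right (by omega)]
    simp
  have e0 : PySem.List.pyGetD (pre ++ [w0, w1, w2, w3] ++ List.replicate (m+1) 0) i 0 = w0 := by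
    rw [PySem.List.pyGetD_eq_getElem _ _ (by omega) (by simp; omega)]
    simp only [show i.toNat = pre.length + 0 from by omega]
    rw [List.getElem_append_left (by simp), List.getElem_append_right (by omega)]
    simp
  simp only [pvStepA, e3, e1, e0]
  rw [List.set_append, if_neg (by simp; omega)]
  have h4 : (i+4).toNat - (pre ++ [w0, w1, w2, w3]).length = 0 := by simp; omega
  rw [h4, List.replicate_succ]
  simp

-- A's loop on the zero-padded seed equals B's window recursion (plus 4 already-emitted words)
lemma pvLoop : ∀ (m : Nat) (pre : List Int) (w0 w1 w2 w3 : Int) (i : Int), 0 ≤ i → pre.length = i.toNat →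
    (PySem.List.pyRange i (i + (m:Int)) 1).foldl pvStepA (pre ++ [w0, w1, w2, w3] ++ List.replicate m 0)
      = pre ++ pvSched w0 w1 w2 w3 i ((m:Int) + 4) := by
  intro m
  induction m with
  | zero =>
      intro pre w0 w1 w2 w3 i hi hl
      rw [PySem.List.pyRange_one_eq_nil (by omega)]
      rw [pvSched, if_pos (by norm_num),
          PySem.List.slice_to _ (by norm_num)]
      simp
  | succ m ih =>
      intro pre w0 w1 w2 w3 i hi hl
      have hcons : PySem.List.pyRange i (i + ((m:Nat)+1:Int)) 1 = i :: PySem.List.pyRange (i+1) (i + ((m:Nat)+1:Int)) 1 :=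
        PySem.List.pyRange_one_cons (by omega)
      have hcast : (((m+1 : Nat)) : Int) = (m:Int) + 1 := by push_cast; ring
      rw [hcast]
      rw [hcons]
      simp only [List.foldl_cons]
      rw [pvStepA_eq m pre w0 w1 w2 w3 i hi hl]
      have hb : i + ((m:Int)+1) = (i+1) + (m:Int) := by ring
      rw [hb, ih (pre ++ [w0]) w1 w2 w3 _ (i+1) (by omega) (by simp; omega)]
      rw [List.append_assoc]
      congr 1
      conv_rhs => rw [pvSched]
      rw [if_neg (by omega), show (m:Int) + 1 + 4 - 1 = (m:Int) + 4 from by ring]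
      simp

-- ===== VERDICT (by name: the statement is the Claim_ definition above) =====
theorem expand_key_simon_all_spec : Claim_equal_expand_key_simon_all := by
  intro k t _hdom hpre
  unfold Spec_expand_key_simon_all
  by_cases ht0 : t ≤ 0
  · rw [expand_key_simon_all, expand_key_simon_all_alt, if_pos (by omega), if_pos ht0,
        PySem.List.pyRange_one_eq_nil (by omega)]
    rfl
  · have hk4 : 4 ≤ k.length := by
      rcases hpre with h | ⟨h, _⟩
      · omega
      · exact h
    rcases k with _ | ⟨a, _ | ⟨b, _ | ⟨c, _ | ⟨d, r⟩⟩⟩⟩ <;> simp at hk4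
    by_cases ht4 : t < 4
    · have h3 : t = 1 ∨ t = 2 ∨ t = 3 := by omega
      rcases h3 with rfl | rfl | rfl
      · simp only [expand_key_simon_all, expand_key_simon_all_alt,
          if_pos (show (1:Int) < 4 by norm_num), if_neg (show ¬ (1:Int) ≤ 0 by norm_num)]
        rw [show PySem.List.pyRange 0 (1:Int) 1 = [0] from by decide,
            pvSched, if_pos (show (1:Int) ≤ 4 by norm_num),
            PySem.List.slice_to _ (show (0:Int) ≤ 1 by norm_num)]
        norm_num [pysem, List.getD]
      · simp only [expand_key_simon_all, expand_key_simon_all_alt,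
          if_pos (show (2:Int) < 4 by norm_num), if_neg (show ¬ (2:Int) ≤ 0 by norm_num)]
        rw [show PySem.List.pyRange 0 (2:Int) 1 = [0, 1] from by decide,
            pvSched, if_pos (show (2:Int) ≤ 4 by norm_num),
            PySem.List.slice_to _ (show (0:Int) ≤ 2 by norm_num)]
        norm_num [pysem, List.getD]
        rfl
      · simp only [expand_key_simon_all, expand_key_simon_all_alt,
          if_pos (show (3:Int) < 4 by norm_num), if_neg (show ¬ (3:Int) ≤ 0 by norm_num)]
        rw [show PySem.List.pyRange 0 (3:Int) 1 = [0, 1, 2] from by decide,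
            pvSched, if_pos (show (3:Int) ≤ 4 by norm_num),
            PySem.List.slice_to _ (show (0:Int) ≤ 3 by norm_num)]
        norm_num [pysem, List.getD]
        rfl
    · -- 4 ≤ t ≤ 32
      simp only [expand_key_simon_all, expand_key_simon_all_alt,
        if_neg (show ¬ t < 4 by omega), if_neg (show ¬ t ≤ 0 by omega)]
      set n : Nat := (t - 4).toNat with hn
      have htn : t.toNat = n + 4 := by omega
      have hrep : List.replicate t.toNat (0:Int) = 0 :: 0 :: 0 :: 0 :: List.replicate n 0 := by
        rw [htn]; rfl
      have hinit : (((((List.replicate t.toNat (0:Int)).set 0 (PySem.List.pyGetD (a::b::c::d::r) 3 0)).set 1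
            (PySem.List.pyGetD (a::b::c::d::r) 2 0)).set 2 (PySem.List.pyGetD (a::b::c::d::r) 1 0)).set 3
            (PySem.List.pyGetD (a::b::c::d::r) 0 0))
          = ([] : List Int) ++ [PySem.List.pyGetD (a::b::c::d::r) 3 0, PySem.List.pyGetD (a::b::c::d::r) 2 0,
             PySem.List.pyGetD (a::b::c::d::r) 1 0, PySem.List.pyGetD (a::b::c::d::r) 0 0]
            ++ List.replicate n 0 := by
        rw [hrep]; rfl
      simp only [hinit]
      have hrange : t - 4 = 0 + (n:Int) := by omega
      rw [hrange, pvLoop n [] _ _ _ _ 0 (by omega) (by simp)]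
      have : (n:Int) + 4 = t := by omega
      rw [this]
      simp
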